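-- pv_equiv track=rewrite | github.com/MrBrantCode/unitest_baseline | mut_generate/mist_test_taco/taco_3881/solution.py | max_pawns_captured
-- ===== SOURCE A (Python) =====
-- def max_pawns_captured(board, knight_pos, n):
--     def maxpawns(x, y):
--         if x >= n or x < 0 or y >= n:
--             return 0
--         if values[y][x] != -1:
--             return values[y][x]
--         values[y][x] = board[y][x] + max(
--             maxpawns(x - 1, y + 2),
--             maxpawns(x + 1, y + 2),
--             maxpawns(x + 2, y + 1),
--             maxpawns(x - 2, y + 1)
--         )
--         return values[y][x]
--
--     # Initialize the values array
--     values = [[-1] * n for _ in range(n)]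
--
--     # Convert board to numerical values
--     for i in range(n):
--         for j in range(n):
--             if board[i][j] == 'K':
--                 board[i][j] = 0
--             elif board[i][j] == 'P':
--                 board[i][j] = 1
--             else:
--                 board[i][j] = 0
--
--     # Extract knight's initial position
--     x1, y1 = knight_pos
--
--     # Calculate the maximum pawns captured
--     return maxpawns(x1, y1)
-- ===== SOURCE B (Python) =====
-- def max_pawns_captured(board, knight_pos, n):
--     # Same in-place conversion of the board as the original (callers may observe it).
--     for i in range(n):
--         for j in range(n):
--             board[i][j] = 1 if board[i][j] == 'P' else 0
--     x1, y1 = knight_pos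
--     if x1 < 0 or x1 >= n or y1 < 0 or y1 >= n:
--         return 0
--     # Bottom-up DP: build rows from y = n-1 down to 0; rows[0] is the row for the
--     # smallest y built so far, so a target at y + d is rows[d - 1].
--     rows = []
--     for y in range(n - 1, -1, -1):
--         def get(nx, d):
--             if 0 <= nx < n and d - 1 < len(rows):
--                 return rows[d - 1][nx]
--             return 0
--         rows.insert(0, [board[y][x] + max(get(x - 1, 2), get(x + 1, 2),
--                                           get(x + 2, 1), get(x - 2, 1))
--                         for x in range(n)])
--     return rows[y1][x1]
-- ===== Notes on version B (the rewrite author's own statement) =====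
-- stated objective: alternative
-- what changed: Replaces the memoized top-down recursion over a mutable n×n memo table with a bottom-up iterative DP that builds the rows from y=n-1 down to 0 and reads the answer off directly (board conversion kept identical, including the in-place mutation).
-- outside the precondition, e.g. on max_pawns_captured([['P', 'P'], ['P', 'P']], (0, -1), 2): A returns 2, B returns 0
import Mathlib
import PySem

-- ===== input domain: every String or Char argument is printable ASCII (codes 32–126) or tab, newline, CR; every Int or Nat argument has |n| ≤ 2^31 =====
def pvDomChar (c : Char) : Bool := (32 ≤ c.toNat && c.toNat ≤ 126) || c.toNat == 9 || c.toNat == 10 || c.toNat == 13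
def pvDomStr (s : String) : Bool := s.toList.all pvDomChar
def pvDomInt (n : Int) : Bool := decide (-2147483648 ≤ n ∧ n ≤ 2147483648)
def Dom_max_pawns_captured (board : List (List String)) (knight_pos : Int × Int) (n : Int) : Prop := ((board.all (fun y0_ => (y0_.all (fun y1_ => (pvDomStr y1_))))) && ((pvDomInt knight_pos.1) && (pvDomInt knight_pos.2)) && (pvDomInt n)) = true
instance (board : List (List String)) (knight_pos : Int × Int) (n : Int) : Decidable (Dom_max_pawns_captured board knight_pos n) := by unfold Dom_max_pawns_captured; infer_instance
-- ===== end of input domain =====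

-- B is a bottom-up iterative DP replacing A's memoized recursion; equivalence is about the
-- RETURN value (both Pythons perform the identical in-place board conversion, so the
-- observable mutation is the same).

-- ===== PORT A =====
-- shared helper: the board conversion ('K'→0, 'P'→1, else 0), identical in both Pythons;
-- ported as a map over the whole board (cells with row/column index ≥ n are never read
-- by either port on inputs admitted by Pre_).
def pvConvert (board : List (List String)) : List (List Int) :=
  board.map (fun row => row.map (fun s => if s == "P" then 1 else 0))

-- board[y][x]; the default 0 is only reachable where the Python read raises (outside Pre_)
def pvCell (b : List (List Int)) (y x : Int) : Int :=
  PySem.List.pyGetD (PySem.List.pyGetD b y []) x 0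

-- values[y][x] = val; exact under Raise.InRange (which holds on Pre_ inputs)
def pvSetAt (v : List (List Int)) (y x : Int) (val : Int) : List (List Int) :=
  PySem.List.pySetD v y (PySem.List.pySetD (PySem.List.pyGetD v y []) x val)

-- A's inner 'maxpawns', with the memo table threaded as state; the fuel argument is a
-- totality device only (it is proved sufficient wherever the claim speaks); the memo
-- read's default -1 is only reachable where the Python read raises (outside Pre_).
def pvMaxpawnsA (b : List (List Int)) (n : Int) :
    Nat → Int → Int → List (List Int) → Int × List (List Int)
  | 0, _, _, v => (0, v)
  | fuel+1, x, y, v =>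
    if x ≥ n ∨ x < 0 ∨ y ≥ n then (0, v)
    else
      let cached := PySem.List.pyGetD (PySem.List.pyGetD v y []) x (-1)
      if cached ≠ -1 then (cached, v)
      else
        let r1 := pvMaxpawnsA b n fuel (x-1) (y+2) v
        let r2 := pvMaxpawnsA b n fuel (x+1) (y+2) r1.2
        let r3 := pvMaxpawnsA b n fuel (x+2) (y+1) r2.2
        let r4 := pvMaxpawnsA b n fuel (x-2) (y+1) r3.2
        let val := pvCell b y x + max (max (max r1.1 r2.1) r3.1) r4.1
        (val, pvSetAt r4.2 y x val)

def max_pawns_captured (board : List (List String)) (knight_pos : Int × Int) (n : Int) : Int :=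
  let values := List.replicate n.toNat (List.replicate n.toNat (-1 : Int))
  let b := pvConvert board
  let x1 := knight_pos.1
  let y1 := knight_pos.2
  (pvMaxpawnsA b n ((n - y1).toNat + 1) x1 y1 values).1

-- ===== PORT B =====
-- Source B's local 'get': rows holds the DP rows for y+1 .. n-1, a target at y+d is rows[d-1]
def pvGetB (rows : List (List Int)) (n : Int) (nx : Int) (d : Nat) : Int :=
  if 0 ≤ nx ∧ nx < n ∧ d - 1 < rows.length then (rows.getD (d-1) []).getD nx.toNat 0 else 0

-- the list comprehension building the DP row for y
def pvRowB (b : List (List Int)) (n y : Int) (rows : List (List Int)) : List Int :=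
  (PySem.List.pyRange 0 n 1).map (fun x =>
    pvCell b y x +
      max (max (max (pvGetB rows n (x-1) 2) (pvGetB rows n (x+1) 2))
               (pvGetB rows n (x+2) 1)) (pvGetB rows n (x-2) 1))

-- the 'for y in range(n-1, -1, -1): rows.insert(0, …)' loop; after k iterations rows
-- holds the rows for y = n-k .. n-1
def pvBuildB (b : List (List Int)) (n : Int) : Nat → List (List Int)
  | 0 => []
  | k+1 => pvRowB b n (n - 1 - (k : Int)) (pvBuildB b n k) :: pvBuildB b n k

def max_pawns_captured_alt (board : List (List String)) (knight_pos : Int × Int) (n : Int) : Int :=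
  let b := pvConvert board
  let x1 := knight_pos.1
  let y1 := knight_pos.2
  if x1 < 0 ∨ x1 ≥ n ∨ y1 < 0 ∨ y1 ≥ n then 0
  else
    let rows := pvBuildB b n n.toNat
    (rows.getD y1.toNat []).getD x1.toNat 0

-- ===== PRECONDITION & SPEC =====
-- Pre_ excludes, for n > 0: (a) boards smaller than n×n, on which A raises IndexError
-- during the conversion loop; (b) knight starts with an on-board x but negative y, where
-- A raises IndexError (y < -n) or returns a value produced by Python's negative-index
-- wraparound through a memo table the recursion also corrupts (-n ≤ y < 0) — an
-- unmatchable artefact of A's implementation (B returns 0 there: the knight is off the board).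
def Pre_max_pawns_captured (board : List (List String)) (knight_pos : Int × Int) (n : Int) : Prop :=
  0 < n →
    (n ≤ (board.length : Int) ∧ (∀ r ∈ board.take n.toNat, n ≤ (r.length : Int)) ∧
      (0 ≤ knight_pos.2 ∨ knight_pos.1 < 0 ∨ n ≤ knight_pos.1))
instance (board : List (List String)) (knight_pos : Int × Int) (n : Int) : Decidable (Pre_max_pawns_captured board knight_pos n) := by unfold Pre_max_pawns_captured; infer_instance

def pvWitness_max_pawns_captured : List (List String) × (Int × Int) × Int :=
  ([["P", "P"], ["K", "."]], (0, 0), 2)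

def Spec_max_pawns_captured (board : List (List String)) (knight_pos : Int × Int) (n : Int) (out : Int) : Prop := out = max_pawns_captured_alt board knight_pos n
instance (board : List (List String)) (knight_pos : Int × Int) (n : Int) (out : Int) : Decidable (Spec_max_pawns_captured board knight_pos n out) := by unfold Spec_max_pawns_captured; infer_instance

-- ===== CLAIM (what is proved, stated in full; the proofs are below) =====
def Claim_equal_max_pawns_captured : Prop := ∀ (board : List (List String)) (knight_pos : Int × Int) (n : Int), Dom_max_pawns_captured board knight_pos n → Pre_max_pawns_captured board knight_pos n → Spec_max_pawns_captured board knight_pos n (max_pawns_captured board knight_pos n)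

-- ===== LEMMAS AND PROOFS =====

-- the pure value both programs compute: best pawns capturable starting at (x, y)
def pvF (b : List (List Int)) (n : Int) (x y : Int) : Int :=
  if x ≥ n ∨ x < 0 ∨ y ≥ n then 0
  else pvCell b y x +
    max (max (max (pvF b n (x-1) (y+2)) (pvF b n (x+1) (y+2)))
             (pvF b n (x+2) (y+1))) (pvF b n (x-2) (y+1))
termination_by (n - y).toNat
decreasing_by all_goals omega

theorem pvF_out {b : List (List Int)} {n x y : Int} (h : x ≥ n ∨ x < 0 ∨ y ≥ n) :
    pvF b n x y = 0 := by rw [pvF]; simp [h]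

theorem pvF_in {b : List (List Int)} {n x y : Int} (h : ¬ (x ≥ n ∨ x < 0 ∨ y ≥ n)) :
    pvF b n x y = pvCell b y x +
      max (max (max (pvF b n (x-1) (y+2)) (pvF b n (x+1) (y+2)))
               (pvF b n (x+2) (y+1))) (pvF b n (x-2) (y+1)) := by
  rw [pvF]; simp [h]

-- ---- B side ----
def pvRowF (b : List (List Int)) (n y : Int) : List Int :=
  (PySem.List.pyRange 0 n 1).map (fun x => pvF b n x y)

theorem pvRowF_getD {b : List (List Int)} {n y x : Int} (hx0 : 0 ≤ x) (hxn : x < n) :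
    (pvRowF b n y).getD x.toNat 0 = pvF b n x y := by
  have hx : x.toNat < (n - 0).toNat := by omega
  have h := PySem.List.pyGetD_map_pyRange_one (fun x => pvF b n x y) 0 n x.toNat 0 hx
  rw [PySem.List.pyGetD_natCast] at h
  rw [pvRowF, h]
  congr 1
  omega

theorem pvGetB_spec {b : List (List Int)} {n y nx : Int} {d : Nat}
    (hy0 : 0 ≤ y) (hyn : y < n) (hd : d = 1 ∨ d = 2) :
    pvGetB ((PySem.List.pyRange (y+1) n 1).map (pvRowF b n)) n nx d = pvF b n nx (y + d) := by
  unfold pvGetB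
  rw [List.length_map, PySem.List.length_pyRange_one]
  split_ifs with h
  · obtain ⟨h1, h2, h3⟩ := h
    have hyd : y + d < n := by rcases hd with rfl | rfl <;> simp at h3 <;> omega
    have hlen : d - 1 < (n - (y+1)).toNat := by rcases hd with rfl | rfl <;> omega
    have hrow : ((PySem.List.pyRange (y+1) n 1).map (pvRowF b n)).getD (d-1) [] =
        pvRowF b n (y + d) := by
      have := PySem.List.pyGetD_map_pyRange_one (pvRowF b n) (y+1) n (d-1) [] hlen
      rw [PySem.List.pyGetD_natCast] at this
      rw [this]
      congr 1
      rcases hd with rfl | rfl <;> push_cast <;> ring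
    rw [hrow, pvRowF_getD h1 h2]
  · push_neg at h
    by_cases h1 : 0 ≤ nx
    · by_cases h2 : nx < n
      · have h3 := h h1 h2
        have : y + d ≥ n := by rcases hd with rfl | rfl <;> omega
        exact (pvF_out (by omega)).symm
      · exact (pvF_out (by omega)).symm
    · exact (pvF_out (by omega)).symm

theorem pvRowB_spec {b : List (List Int)} {n y : Int} (hy0 : 0 ≤ y) (hyn : y < n) :
    pvRowB b n y ((PySem.List.pyRange (y+1) n 1).map (pvRowF b n)) = pvRowF b n y := by
  unfold pvRowB
  conv_rhs => rw [pvRowF]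
  apply List.map_congr_left
  intro x hx
  rw [PySem.List.mem_pyRange_one] at hx
  have hg : ¬ (x ≥ n ∨ x < 0 ∨ y ≥ n) := by omega
  rw [pvGetB_spec hy0 hyn (Or.inr rfl), pvGetB_spec hy0 hyn (Or.inr rfl),
      pvGetB_spec hy0 hyn (Or.inl rfl), pvGetB_spec hy0 hyn (Or.inl rfl), pvF_in hg]
  norm_num

theorem pvBuildB_spec {b : List (List Int)} {n : Int} (k : Nat) (hk : (k : Int) ≤ n) :
    pvBuildB b n k = (PySem.List.pyRange (n - k) n 1).map (pvRowF b n) := by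
  induction k with
  | zero => simp [pvBuildB, PySem.List.pyRange_one_eq_nil (by omega)]
  | succ k ih =>
    have hk' : (k : Int) ≤ n := by push_cast at hk ⊢; omega
    rw [pvBuildB, ih hk']
    have hcons : PySem.List.pyRange (n - (k+1 : Nat)) n 1 =
        (n - (k+1 : Nat)) :: PySem.List.pyRange (n - (k+1 : Nat) + 1) n 1 :=
      PySem.List.pyRange_one_cons (by push_cast at hk ⊢; omega)
    rw [hcons, List.map_cons]
    have he1 : n - (k+1 : Nat) + 1 = n - (k : Int) := by push_cast; ring
    have he2 : n - 1 - (k : Int) = n - (k+1 : Nat) := by push_cast; ring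
    rw [he1, he2]
    congr 1
    have := pvRowB_spec (b := b) (n := n)
      (y := n - ((k:Nat)+1 : Nat)) (by push_cast at hk ⊢; omega) (by push_cast at hk ⊢; omega)
    rw [← this]
    congr 1
    push_cast
    ring

-- ---- A side ----
-- memo-table invariant: an n×n table each of whose entries is -1 or the true value
def pvInv (b : List (List Int)) (n : Int) (v : List (List Int)) : Prop :=
  v.length = n.toNat ∧ (∀ r ∈ v, r.length = n.toNat) ∧
    ∀ i j : Nat, i < n.toNat → j < n.toNat →
      (v.getD i []).getD j 0 = -1 ∨ (v.getD i []).getD j 0 = pvF b n (j : Int) (i : Int)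

theorem pvInv_read {b : List (List Int)} {n : Int} {v : List (List Int)} {x y : Int}
    (hv : pvInv b n v) (hy0 : 0 ≤ y) (hyn : y < n) (hx0 : 0 ≤ x) (hxn : x < n) :
    PySem.List.pyGetD (PySem.List.pyGetD v y []) x (-1) = (v.getD y.toNat []).getD x.toNat 0 := by
  obtain ⟨hl, hr, _⟩ := hv
  have hyl : y.toNat < v.length := by omega
  have hgd : v.getD y.toNat [] = v[y.toNat] := by
    rw [List.getD_eq_getElem?_getD, List.getElem?_eq_getElem hyl]; rfl
  have hrl : (v[y.toNat]).length = n.toNat := hr _ (v.getElem_mem hyl)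
  have hxr : x.toNat < (v[y.toNat]).length := by omega
  have hrow : PySem.List.pyGetD v y [] = v[y.toNat] := by
    rw [PySem.List.pyGetD_eq_getElem v [] hy0 (by omega)]
  have hent : (v[y.toNat]).getD x.toNat 0 = v[y.toNat][x.toNat] := by
    rw [List.getD_eq_getElem?_getD, List.getElem?_eq_getElem hxr]; rfl
  rw [hrow, PySem.List.pyGetD_eq_getElem _ _ hx0 (by omega), hgd, hent]

theorem pvInv_set {b : List (List Int)} {n : Int} {v : List (List Int)} {x y : Int}
    (hv : pvInv b n v) (hy0 : 0 ≤ y) (hyn : y < n) (hx0 : 0 ≤ x) (hxn : x < n) :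
    pvInv b n (pvSetAt v y x (pvF b n x y)) := by
  obtain ⟨hl, hr, he⟩ := hv
  have hyl : y.toNat < v.length := by omega
  have hgd : v.getD y.toNat [] = v[y.toNat] := by
    rw [List.getD_eq_getElem?_getD, List.getElem?_eq_getElem hyl]; rfl
  have hvrow : v.getD y.toNat [] ∈ v := by rw [hgd]; exact v.getElem_mem hyl
  have hrl : (v.getD y.toNat []).length = n.toNat := hr _ hvrow
  have hrow : PySem.List.pyGetD v y [] = v.getD y.toNat [] := by
    rw [PySem.List.pyGetD_eq_getElem v [] hy0 (by omega), hgd]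
  have hset : pvSetAt v y x (pvF b n x y) =
      v.set y.toNat ((v.getD y.toNat []).set x.toNat (pvF b n x y)) := by
    unfold pvSetAt
    rw [hrow, PySem.List.pySetD_of_nonneg _ _ hx0, PySem.List.pySetD_of_nonneg _ _ hy0]
  rw [hset]
  refine ⟨by simpa using hl, ?_, ?_⟩
  · intro r hrm
    rcases List.mem_or_eq_of_mem_set hrm with h | h
    · exact hr _ h
    · subst h
      rw [List.length_set]
      exact hrl
  · intro i j hi hj
    by_cases hiy : i = y.toNat
    · have h1 : (v.set y.toNat ((v.getD y.toNat []).set x.toNat (pvF b n x y))).getD i [] =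
          (v.getD y.toNat []).set x.toNat (pvF b n x y) := by
        rw [hiy, List.getD_eq_getElem?_getD, List.getElem?_set_self (by simpa using hyl)]; rfl
      rw [h1]
      by_cases hjx : j = x.toNat
      · have h2 : ((v.getD y.toNat []).set x.toNat (pvF b n x y)).getD j 0 = pvF b n x y := by
          rw [hjx, List.getD_eq_getElem?_getD, List.getElem?_set_self (by omega)]; rfl
        rw [h2]
        right
        rw [show ((j : Nat) : Int) = x by omega, show ((i : Nat) : Int) = y by omega]
      · have h2 : ((v.getD y.toNat []).set x.toNat (pvF b n x y)).getD j 0 =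
            (v.getD y.toNat []).getD j 0 := by
          rw [List.getD_eq_getElem?_getD, List.getElem?_set_ne (by omega),
              ← List.getD_eq_getElem?_getD]
        rw [h2, ← hiy]
        exact he i j hi hj
    · have h1 : (v.set y.toNat ((v.getD y.toNat []).set x.toNat (pvF b n x y))).getD i [] =
          v.getD i [] := by
        rw [List.getD_eq_getElem?_getD, List.getElem?_set_ne (by omega),
            ← List.getD_eq_getElem?_getD]
      rw [h1]
      exact he i j hi hj

theorem pvMaxpawnsA_spec {b : List (List Int)} {n : Int} :
    ∀ (fuel : Nat) (x y : Int) (v : List (List Int)),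
      pvInv b n v → 0 ≤ y → (n - y).toNat < fuel →
      (pvMaxpawnsA b n fuel x y v).1 = pvF b n x y ∧ pvInv b n (pvMaxpawnsA b n fuel x y v).2 := by
  intro fuel
  induction fuel with
  | zero => intro x y v _ _ h; omega
  | succ fuel ih =>
    intro x y v hv hy0 hfuel
    rw [pvMaxpawnsA]
    by_cases hg : x ≥ n ∨ x < 0 ∨ y ≥ n
    · simp only [hg, if_true]
      exact ⟨(pvF_out hg).symm, hv⟩
    · simp only [hg, if_false]
      push_neg at hg
      obtain ⟨hxn, hx0, hyn⟩ := hg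
      have hread := pvInv_read hv hy0 hyn hx0 hxn
      have hmem := (hv.2.2 y.toNat x.toNat (by omega) (by omega))
      by_cases hc : PySem.List.pyGetD (PySem.List.pyGetD v y []) x (-1) ≠ -1
      · rw [if_pos hc]
        refine ⟨?_, hv⟩
        rw [hread] at hc ⊢
        rcases hmem with h | h
        · exact absurd h hc
        · rw [h, Int.toNat_of_nonneg hx0, Int.toNat_of_nonneg hy0]
      · rw [if_neg hc]
        have hf : (n - y).toNat ≤ fuel := by omega
        have hgx : ¬ (x ≥ n ∨ x < 0 ∨ y ≥ n) := by omega
        have h1 := ih (x-1) (y+2) v hv (by omega) (by omega)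
        have h2 := ih (x+1) (y+2) _ h1.2 (by omega) (by omega)
        have h3 := ih (x+2) (y+1) _ h2.2 (by omega) (by omega)
        have h4 := ih (x-2) (y+1) _ h3.2 (by omega) (by omega)
        dsimp only
        constructor
        · rw [h1.1, h2.1, h3.1, h4.1, ← pvF_in hgx]
        · rw [h1.1, h2.1, h3.1, h4.1, ← pvF_in hgx]
          exact pvInv_set h4.2 hy0 hyn hx0 hxn

theorem pvInv_init {b : List (List Int)} {n : Int} :
    pvInv b n (List.replicate n.toNat (List.replicate n.toNat (-1 : Int))) := by
  refine ⟨by simp, ?_, ?_⟩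
  · intro r hrm
    rw [List.eq_of_mem_replicate hrm]
    simp
  · intro i j hi hj
    left
    have h1 : (List.replicate n.toNat (List.replicate n.toNat (-1 : Int))).getD i [] =
        List.replicate n.toNat (-1 : Int) := by
      rw [List.getD_eq_getElem?_getD, List.getElem?_replicate, if_pos hi]; rfl
    rw [h1, List.getD_eq_getElem?_getD, List.getElem?_replicate, if_pos hj]; rfl

-- ===== VERDICT (by name: the statement is the Claim_ definition above) =====
theorem max_pawns_captured_spec : Claim_equal_max_pawns_captured := by
  intro board knight_pos n _hdom hpre
  obtain ⟨x1, y1⟩ := knight_pos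
  show (pvMaxpawnsA (pvConvert board) n ((n - y1).toNat + 1) x1 y1
      (List.replicate n.toNat (List.replicate n.toNat (-1 : Int)))).1 =
    (if x1 < 0 ∨ x1 ≥ n ∨ y1 < 0 ∨ y1 ≥ n then (0 : Int)
     else ((pvBuildB (pvConvert board) n n.toNat).getD y1.toNat []).getD x1.toNat 0)
  by_cases hx : x1 < 0 ∨ x1 ≥ n
  · -- knight's column off the board: both sides return 0 immediately
    rw [pvMaxpawnsA, if_pos (show x1 ≥ n ∨ x1 < 0 ∨ y1 ≥ n by tauto), if_pos (by tauto)]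
  · push_neg at hx
    obtain ⟨hx0, hxn⟩ := hx
    have hn : 0 < n := by omega
    obtain ⟨-, -, hy⟩ := hpre hn
    have hy0 : 0 ≤ y1 := by rcases hy with h | h | h <;> omega
    by_cases hyn : n ≤ y1
    · rw [pvMaxpawnsA, if_pos (by omega), if_pos (by omega)]
    · push_neg at hyn
      rw [if_neg (by omega)]
      rw [(pvMaxpawnsA_spec (b := pvConvert board) (n := n) _ x1 y1 _
        pvInv_init hy0 (by omega)).1]
      rw [pvBuildB_spec n.toNat (by omega)]
      rw [show n - (n.toNat : Int) = 0 by omega]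
      have hlt : y1.toNat < (n - 0).toNat := by omega
      have h := PySem.List.pyGetD_map_pyRange_one (pvRowF (pvConvert board) n) 0 n y1.toNat [] hlt
      rw [PySem.List.pyGetD_natCast] at h
      rw [h, show (0 : Int) + (y1.toNat : Int) = y1 by omega, pvRowF_getD hx0 hxn]
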